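-- pv_equiv track=rewrite | github.com/akikuno/DAJIN2 | src/DAJIN2/core/report/html_builder.py | has_consecutive_matches
-- ===== SOURCE A (Python) =====
-- def has_consecutive_matches(flanked_tag: list[str], n: int = 10) -> bool:
--     count_match = 0
--     for tag in flanked_tag:
--         if tag.startswith("<"):
--             count_match = 0
--         else:
--             count_match += 1
--
--     if count_match >= n:
--         return True
--
--     return False
-- ===== SOURCE B (Python) =====
-- def has_consecutive_matches(flanked_tag: list[str], n: int = 10) -> bool:
--     # Two-stage: collect the indices of tag elements, then the trailing run of
--     # non-tag elements is everything after the last such index.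
--     tag_positions = [i for i, tag in enumerate(flanked_tag) if tag.startswith("<")]
--     boundary = tag_positions[-1] + 1 if tag_positions else 0
--     return len(flanked_tag) - boundary >= n
-- ===== Notes on version B (the rewrite author's own statement) =====
-- stated objective: alternative
-- what changed: A scans forward with a counter that resets at every '<' tag; B first collects the indices of all '<' tags, then computes the trailing non-tag run arithmetically as len minus (last tag index + 1) and compares it with n.
import Mathlib
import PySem

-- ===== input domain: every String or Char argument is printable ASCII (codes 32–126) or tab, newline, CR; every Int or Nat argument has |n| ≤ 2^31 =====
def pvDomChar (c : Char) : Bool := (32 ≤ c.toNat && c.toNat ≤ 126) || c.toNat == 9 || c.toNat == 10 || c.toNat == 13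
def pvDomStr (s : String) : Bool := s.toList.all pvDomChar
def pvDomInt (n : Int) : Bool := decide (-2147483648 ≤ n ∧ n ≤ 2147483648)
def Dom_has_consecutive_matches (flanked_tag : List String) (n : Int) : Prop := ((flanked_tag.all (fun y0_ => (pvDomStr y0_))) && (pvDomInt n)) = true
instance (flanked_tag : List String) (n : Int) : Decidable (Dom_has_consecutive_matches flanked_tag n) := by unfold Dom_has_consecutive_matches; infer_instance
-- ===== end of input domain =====

-- ===== PORT A =====
-- B replaces A's single forward reset-counter scan with two stages: collect the
-- indices of '<' tags, then decide arithmetically from the last one (objective: alternative).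
def has_consecutive_matches (flanked_tag : List String) (n : Int) : Bool :=
  let count_match : Int :=
    flanked_tag.foldl (fun count_match tag =>
      if PySem.Str.startswith tag "<" then 0 else count_match + 1) 0
  if count_match ≥ n then true else false

-- ===== PORT B =====
def has_consecutive_matches_alt (flanked_tag : List String) (n : Int) : Bool :=
  let tag_positions : List Int :=
    (PySem.List.enumerate flanked_tag).filterMap (fun p =>
      if PySem.Str.startswith p.2 "<" then some p.1 else none)
  let boundary : Int :=
    match tag_positions.getLast? with
    | some i => i + 1
    | none => 0
  decide ((flanked_tag.length : Int) - boundary ≥ n)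

-- ===== PRECONDITION & SPEC =====
def Spec_has_consecutive_matches (flanked_tag : List String) (n : Int) (out : Bool) : Prop := out = has_consecutive_matches_alt flanked_tag n
instance (flanked_tag : List String) (n : Int) (out : Bool) : Decidable (Spec_has_consecutive_matches flanked_tag n out) := by unfold Spec_has_consecutive_matches; infer_instance

-- ===== CLAIM =====
def Claim_equal_has_consecutive_matches : Prop := ∀ (flanked_tag : List String) (n : Int), Dom_has_consecutive_matches flanked_tag n → Spec_has_consecutive_matches flanked_tag n (has_consecutive_matches flanked_tag n)

-- ===== LEMMAS AND PROOFS =====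
-- A's reset-counter fold equals the list length minus B's boundary (the position
-- just after the last '<' tag), for any enumeration start offset s.
theorem fold_eq_len_sub_boundary (l : List String) (s : Int) :
    l.foldl (fun count_match tag =>
      if PySem.Str.startswith tag "<" then 0 else count_match + 1) (0 : Int)
    = (l.length : Int) -
      (match ((PySem.List.enumerate l s).filterMap (fun p =>
          if PySem.Str.startswith p.2 "<" then some p.1 else none)).getLast? with
        | some i => i + 1 - s
        | none => 0) := by
  induction l using List.reverseRecOn generalizing s with
  | nil => simp [PySem.List.enumerate]
  | append_singleton l x ih =>
      rw [List.foldl_append, PySem.List.enumerate_append, List.filterMap_append]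
      simp only [List.foldl_cons, List.foldl_nil, PySem.List.enumerate_cons,
        PySem.List.enumerate_nil, List.filterMap_cons, List.filterMap_nil]
      by_cases h : PySem.Str.startswith x "<"
      · simp only [PySem.Str.startswith, show "<".toList = ['<'] from rfl] at h
        simp [h]
        ring
      · simp only [h, if_neg, Bool.false_eq_true, not_false_eq_true, List.append_nil,
          List.length_append, List.length_singleton]
        rw [ih s]
        push_cast
        rcases ((PySem.List.enumerate l s).filterMap (fun p =>
            if PySem.Str.startswith p.2 "<" then some p.1 else none)).getLast? with _ | i <;>
          simp <;> ring

-- ===== VERDICT =====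
theorem has_consecutive_matches_spec : Claim_equal_has_consecutive_matches := by
  intro flanked_tag n _
  unfold Spec_has_consecutive_matches has_consecutive_matches has_consecutive_matches_alt
  rw [fold_eq_len_sub_boundary flanked_tag 0]
  rcases ((PySem.List.enumerate flanked_tag 0).filterMap (fun p =>
      if PySem.Str.startswith p.2 "<" then some p.1 else none)).getLast? with _ | i <;>
    simp
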